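-- pv_equiv track=rewrite | github.com/tfwu/iVMCL-Release | mmdetection/mmdet/ivmcl/ops/aog_block.py | _calculate_slices
-- ===== SOURCE A (Python) =====
-- def _calculate_slices(dim, channels):
--     slices = [0] * dim
--     for i in range(channels):
--         slices[i % dim] += 1
--     for d in range(1, dim):
--         slices[d] += slices[d - 1]
--     slices = [0] + slices
--     return slices
-- ===== SOURCE B (Python) =====
-- def _calculate_slices(dim, channels):
--     # Closed form (no per-channel loop): each of the first (channels % dim) bins gets one extra channel
--     # on top of channels // dim; entry k is the cumulative count of the first k bins.
--     q, r = divmod(max(channels, 0), dim)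
--     return [k * q + min(k, r) for k in range(dim + 1)]
-- ===== Notes on version B (the rewrite author's own statement) =====
-- stated objective: alternative
-- what changed: Replaces the per-channel increment loop plus in-place prefix-sum pass by the closed form k*(channels//dim) + min(k, channels%dim) evaluated directly for each of the dim+1 entries.
-- outside the precondition, e.g. on _calculate_slices(0, 0): A returns [0], B raises ZeroDivisionError; on _calculate_slices(-1, 0): A returns [0], B returns []
import Mathlib
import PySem

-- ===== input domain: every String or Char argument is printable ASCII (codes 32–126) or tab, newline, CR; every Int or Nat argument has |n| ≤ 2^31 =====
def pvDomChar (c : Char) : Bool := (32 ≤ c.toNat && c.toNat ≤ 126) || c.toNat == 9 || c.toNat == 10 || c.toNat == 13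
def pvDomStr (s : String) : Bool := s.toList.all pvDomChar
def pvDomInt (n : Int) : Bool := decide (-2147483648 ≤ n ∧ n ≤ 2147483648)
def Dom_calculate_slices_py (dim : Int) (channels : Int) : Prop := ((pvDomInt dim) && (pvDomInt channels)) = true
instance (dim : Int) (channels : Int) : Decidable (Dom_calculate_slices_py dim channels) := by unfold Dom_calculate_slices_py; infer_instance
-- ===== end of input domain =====

-- B replaces A's per-channel counting loop + in-place prefix pass by the closed form
-- k*(channels//dim) + min(k, channels%dim), evaluated directly for each entry (alternative algorithm).


-- ===== PORT A =====
-- literal port of A: slices = [0]*dim; per-channel increment at i % dim; in-place prefix pass; prepend 0.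
-- Index arithmetic uses .toNat, exact on Pre_ (dim ≥ 1), where every index Python touches is nonnegative and in range.
def calculate_slices_py (dim : Int) (channels : Int) : List Int :=
  let slices : List Int := List.replicate dim.toNat 0
  let slices := (PySem.List.pyRange 0 channels 1).foldl
      (fun s i => s.set (PySem.Int.mod i dim).toNat (s.getD (PySem.Int.mod i dim).toNat 0 + 1)) slices
  let slices := (PySem.List.pyRange 1 dim 1).foldl
      (fun s d => s.set d.toNat (s.getD d.toNat 0 + s.getD (d - 1).toNat 0)) slices
  0 :: slices

-- ===== PORT B =====
-- literal port of B: q, r = divmod(max(channels, 0), dim); [k*q + min(k, r) for k in range(dim+1)]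
def calculate_slices_py_alt (dim : Int) (channels : Int) : List Int :=
  let c := max channels 0
  let q := PySem.Int.floordiv c dim
  let r := PySem.Int.mod c dim
  (PySem.List.pyRange 0 (dim + 1) 1).map (fun k => k * q + min k r)

-- ===== PRECONDITION & SPEC =====
-- Pre_ excludes nonpositive dim: there are no bins there, A raises for any positive channels and its
-- [0] for channels ≤ 0 is a degenerate artefact of the prepended 0; B raises (dim = 0) or returns [] there.
def Pre_calculate_slices_py (dim : Int) (channels : Int) : Prop := 1 ≤ dim
instance (dim : Int) (channels : Int) : Decidable (Pre_calculate_slices_py dim channels) := by unfold Pre_calculate_slices_py; infer_instance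
def pvWitness_calculate_slices_py : Int × Int := (3, 7)

def Spec_calculate_slices_py (dim : Int) (channels : Int) (out : List Int) : Prop := out = calculate_slices_py_alt dim channels
instance (dim : Int) (channels : Int) (out : List Int) : Decidable (Spec_calculate_slices_py dim channels out) := by unfold Spec_calculate_slices_py; infer_instance

-- ===== CLAIM (what is proved, stated in full; the proofs are below) =====
def Claim_equal_calculate_slices_py : Prop := ∀ (dim : Int) (channels : Int), Dom_calculate_slices_py dim channels → Pre_calculate_slices_py dim channels → Spec_calculate_slices_py dim channels (calculate_slices_py dim channels)

-- ===== LEMMAS AND PROOFS =====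

-- per-bin count after seeing n channels, d bins
def pvCnt (d n j : Nat) : Int := (n / d : Nat) + (if j < n % d then 1 else 0)
-- cumulative count of bins 0..j
def pvPre (d n j : Nat) : Int := ((j + 1) * (n / d : Nat) : Int) + min ((j : Int) + 1) (n % d : Nat)

lemma succ_divmod (n d : Nat) (hd : 0 < d) :
    ((n + 1) / d = n / d + 1 ∧ (n + 1) % d = 0 ∧ n % d + 1 = d) ∨
    ((n + 1) / d = n / d ∧ (n + 1) % d = n % d + 1 ∧ n % d + 1 < d) := by
  have h1 := Nat.div_add_mod n d
  have h2 : n % d < d := Nat.mod_lt _ hd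
  rcases Nat.lt_or_ge (n % d + 1) d with hl | hge
  · right
    have := (Nat.div_mod_unique (b := d) (a := n + 1) (d := n / d) (c := n % d + 1) hd).mpr
      ⟨by omega, hl⟩
    exact ⟨this.1, this.2, hl⟩
  · left
    have he : n % d + 1 = d := by omega
    have hm : d * (n / d + 1) = d * (n / d) + d := by ring
    have := (Nat.div_mod_unique (b := d) (a := n + 1) (d := n / d + 1) (c := 0) hd).mpr
      ⟨by omega, hd⟩
    exact ⟨this.1, this.2, he⟩

lemma cnt_succ (d n j : Nat) (hd : 0 < d) (hj : j < d) :
    pvCnt d (n + 1) j = pvCnt d n j + (if n % d = j then 1 else 0) := by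
  unfold pvCnt
  rcases succ_divmod n d hd with ⟨h1, h2, h3⟩ | ⟨h1, h2, h3⟩ <;>
    rw [h1, h2] <;> split_ifs <;> push_cast <;> omega

-- state after the counting loop over the first n channels
lemma count_fold (d : Nat) (hd : 0 < d) (n : Nat) :
    (List.range n).foldl (fun (s : List Int) k => s.set (k % d) (s.getD (k % d) 0 + 1))
        (List.replicate d (0 : Int))
      = List.ofFn (fun j : Fin d => pvCnt d n j) := by
  induction n with
  | zero =>
    apply List.ext_getElem <;> simp [pvCnt, Nat.zero_div]
  | succ n ih =>
    rw [List.range_succ, List.foldl_append, ih]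
    simp only [List.foldl_cons, List.foldl_nil]
    have hmd : n % d < d := Nat.mod_lt _ hd
    have hget : (List.ofFn (fun j : Fin d => pvCnt d n j)).getD (n % d) 0 = pvCnt d n (n % d) := by
      rw [List.getD_eq_getElem _ _ (by simpa using hmd)]
      simp
    rw [hget]
    apply List.ext_getElem
    · simp
    · intro i h1 h2
      have hi : i < d := by simpa using h1
      rw [List.getElem_set]
      simp only [List.getElem_ofFn]
      split_ifs with he
      · rw [← he, cnt_succ d n (n % d) hd hmd]
        simp
      · rw [cnt_succ d n i hd hi]
        simp [he]

lemma pre_zero (d n : Nat) : pvPre d n 0 = pvCnt d n 0 := by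
  unfold pvPre pvCnt
  have : n % d ≥ 0 := Nat.zero_le _
  split_ifs with h <;> push_cast <;> omega

lemma pre_succ (d n j : Nat) :
    pvPre d n (j + 1) = pvPre d n j + pvCnt d n (j + 1) := by
  unfold pvPre pvCnt
  have hq : ((j : Int) + 1 + 1) * ((n / d : Nat) : Int)
      = ((j : Int) + 1) * ((n / d : Nat) : Int) + ((n / d : Nat) : Int) := by ring
  simp only [min_def]
  split_ifs <;> push_cast at hq ⊢ <;> omega

-- state after the prefix pass over positions 1..t
lemma prefix_fold (d n : Nat) (hd : 0 < d) (t : Nat) (ht : t ≤ d - 1) :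
    (List.range t).foldl (fun (s : List Int) k => s.set (k + 1) (s.getD (k + 1) 0 + s.getD k 0))
        (List.ofFn (fun j : Fin d => pvCnt d n j))
      = List.ofFn (fun j : Fin d => if (j : Nat) ≤ t then pvPre d n j else pvCnt d n j) := by
  induction t with
  | zero =>
    simp only [List.range_zero, List.foldl_nil]
    apply List.ext_getElem
    · simp
    · intro i h1 h2
      simp only [List.getElem_ofFn]
      split_ifs with h
      · have h0 : i = 0 := by omega
        subst h0
        exact (pre_zero d n).symm
      · rfl
  | succ t ih =>
    have ht' : t ≤ d - 1 := by omega
    have htd : t + 1 < d := by omega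
    rw [List.range_succ, List.foldl_append, ih ht']
    simp only [List.foldl_cons, List.foldl_nil]
    have hg1 : (List.ofFn (fun j : Fin d => if (j : Nat) ≤ t then pvPre d n j else pvCnt d n j)).getD (t + 1) 0
        = pvCnt d n (t + 1) := by
      rw [List.getD_eq_getElem _ _ (by simpa using htd)]
      simp
    have hg0 : (List.ofFn (fun j : Fin d => if (j : Nat) ≤ t then pvPre d n j else pvCnt d n j)).getD t 0
        = pvPre d n t := by
      rw [List.getD_eq_getElem _ _ (by simp; omega)]
      simp
    rw [hg1, hg0]
    apply List.ext_getElem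
    · simp
    · intro i h1 h2
      have hi : i < d := by simpa using h1
      rw [List.getElem_set]
      simp only [List.getElem_ofFn]
      by_cases he : t + 1 = i
      · subst he
        rw [if_pos rfl, if_pos (Nat.le_refl _), pre_succ d n t]
        ring
      · rw [if_neg he]
        by_cases hle : i ≤ t
        · rw [if_pos hle, if_pos (by omega : i ≤ t + 1)]
        · rw [if_neg hle, if_neg (by omega : ¬ i ≤ t + 1)]

-- evaluation of port A to a closed-form list, for positive dim
lemma calcA_eval (dN : Nat) (hd : 0 < dN) (channels : Int) :
    calculate_slices_py (dN : Int) channels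
      = 0 :: List.ofFn (fun j : Fin dN => pvPre dN channels.toNat j) := by
  have h1 : PySem.List.pyRange 0 channels 1
      = (List.range channels.toNat).map (fun k : Nat => (0 : Int) + k) := by
    rw [PySem.List.pyRange_one]
    have e : (channels - 0).toNat = channels.toNat := by omega
    rw [e]
  have h2 : PySem.List.pyRange 1 (dN : Int) 1
      = (List.range (dN - 1)).map (fun k : Nat => (1 : Int) + k) := by
    rw [PySem.List.pyRange_one]
    have e : ((dN : Int) - 1).toNat = dN - 1 := by omega
    rw [e]
  simp only [calculate_slices_py]
  rw [h1, h2, List.foldl_map, List.foldl_map]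
  have hfun1 : (fun (s : List Int) (k : Nat) =>
        s.set (PySem.Int.mod ((0 : Int) + k) (dN : Int)).toNat
          ((s.getD (PySem.Int.mod ((0 : Int) + k) (dN : Int)).toNat 0) + 1))
      = fun (s : List Int) (k : Nat) => s.set (k % dN) (s.getD (k % dN) 0 + 1) := by
    funext s k
    have hm : PySem.Int.mod ((0 : Int) + k) (dN : Int) = ((k % dN : Nat) : Int) := by
      rw [zero_add]
      exact_mod_cast PySem.Int.mod_natCast k dN
    rw [hm, Int.toNat_natCast]
  have hfun2 : (fun (s : List Int) (k : Nat) =>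
        s.set ((1 : Int) + k).toNat
          ((s.getD ((1 : Int) + k).toNat 0) + (s.getD ((1 : Int) + k - 1).toNat 0)))
      = fun (s : List Int) (k : Nat) => s.set (k + 1) (s.getD (k + 1) 0 + s.getD k 0) := by
    funext s k
    have e1 : ((1 : Int) + k).toNat = k + 1 := by omega
    have e2 : ((1 : Int) + k - 1).toNat = k := by omega
    rw [e1, e2]
  rw [hfun1, hfun2]
  have hrep : ((dN : Int)).toNat = dN := by omega
  rw [hrep, count_fold dN hd channels.toNat, prefix_fold dN channels.toNat hd (dN - 1) le_rfl]
  congr 1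
  apply List.ext_getElem
  · simp
  · intro i hA hB
    have hi : i < dN := by simpa using hA
    simp only [List.getElem_ofFn]
    rw [if_pos (by omega : i ≤ dN - 1)]

-- evaluation of port B to the mapped closed form, for positive dim
lemma calcB_eval (dN : Nat) (hd : 0 < dN) (channels : Int) :
    calculate_slices_py_alt (dN : Int) channels
      = (List.range (dN + 1)).map (fun k : Nat =>
          (k : Int) * ((channels.toNat / dN : Nat) : Int)
            + min (k : Int) ((channels.toNat % dN : Nat) : Int)) := by
  have hc : max channels 0 = ((channels.toNat : Nat) : Int) := by omega
  have hq : PySem.Int.floordiv ((channels.toNat : Nat) : Int) (dN : Int)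
      = ((channels.toNat / dN : Nat) : Int) := by
    exact_mod_cast PySem.Int.floordiv_natCast channels.toNat dN
  have hr : PySem.Int.mod ((channels.toNat : Nat) : Int) (dN : Int)
      = ((channels.toNat % dN : Nat) : Int) := by
    exact_mod_cast PySem.Int.mod_natCast channels.toNat dN
  have h1 : PySem.List.pyRange 0 ((dN : Int) + 1) 1
      = (List.range (dN + 1)).map (fun k : Nat => (0 : Int) + k) := by
    rw [PySem.List.pyRange_one]
    have e : ((dN : Int) + 1 - 0).toNat = dN + 1 := by omega
    rw [e]
  simp only [calculate_slices_py_alt]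
  rw [hc, hq, hr, h1, List.map_map]
  congr 1
  funext k
  simp

-- ===== VERDICT (by name: the statement is the Claim_ definition above) =====
theorem calculate_slices_py_spec : Claim_equal_calculate_slices_py := by
  intro dim channels _ hpre
  unfold Pre_calculate_slices_py at hpre
  obtain ⟨dN, rfl⟩ : ∃ d : Nat, dim = (d : Int) := ⟨dim.toNat, by omega⟩
  have hd : 0 < dN := by exact_mod_cast hpre
  unfold Spec_calculate_slices_py
  rw [calcA_eval dN hd channels, calcB_eval dN hd channels]
  apply List.ext_getElem
  · simp
  · intro i h1 h2
    have hi : i < dN + 1 := by simpa using h2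
    match i, hi with
    | 0, _ =>
      simp only [List.getElem_cons_zero, List.getElem_map, List.getElem_range, Nat.cast_zero,
        zero_mul, zero_add]
      rw [min_eq_left (Int.natCast_nonneg _)]
    | (j + 1), hj =>
      simp only [List.getElem_cons_succ, List.getElem_ofFn, List.getElem_map, List.getElem_range]
      unfold pvPre
      push_cast
      ring
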